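-- pv_equiv track=rewrite | github.com/james5635/GeekForGeek-Data-Structure-and-Algorithm | hashing/hard/maximum_array_two_arrays/solution.py | max_array_from_two_arrays_with_k
-- ===== SOURCE A (Python) =====
-- from typing import List
--
-- def max_array_greedy(A: List[int], B: List[int]) -> List[int]:
--     """
--     Greedy approach for maximum array.
--
--     Time Complexity: O(n + m)
--     Space Complexity: O(n + m)
--     """
--
--     def merge_max_arrays(arr1: List[int], arr2: List[int]) -> List[int]:
--         """Merge two arrays to get maximum lexicographical order."""
--         result = []
--         i, j = 0, 0
--
--         while i < len(arr1) and j < len(arr2):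
--             if arr1[i:] > arr2[j:]:
--                 result.append(arr1[i])
--                 i += 1
--             else:
--                 result.append(arr2[j])
--                 j += 1
--
--         result.extend(arr1[i:])
--         result.extend(arr2[j:])
--         return result
--
--     return merge_max_arrays(A, B)
--
-- def max_subsequence_of_length_k(nums: List[int], k: int) -> List[int]:
--     """
--     Find maximum subsequence of length k preserving relative order.
--
--     Uses monotonic stack approach.
--     """
--     n = len(nums)
--     if k == 0:
--         return []
--     if k == n:
--         return nums[:]
--
--     stack = []
--     to_remove = n - k
--
--     for num in nums:
--         while stack and to_remove > 0 and stack[-1] < num: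
--             stack.pop()
--             to_remove -= 1
--         stack.append(num)
--
--     # Remove remaining elements if any
--     while to_remove > 0:
--         stack.pop()
--         to_remove -= 1
--
--     return stack
--
-- def max_array_from_two_arrays_with_k(A: List[int], B: List[int], k: int) -> List[int]:
--     """
--     Create maximum array of length k using elements from both arrays.
--
--     Args:
--         A: First array
--         B: Second array
--         k: Desired length of result
--
--     Returns:
--         Maximum lexicographical array of length k
--     """
--     max_result = []
--
--     # Try all possible ways to take elements from A and B
--     for take_from_A in range(max(0, k - len(B)), min(k, len(A)) + 1):
--         take_from_B = k - take_from_A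
--
--         # Get maximum subsequences
--         sub_A = max_subsequence_of_length_k(A, take_from_A)
--         sub_B = max_subsequence_of_length_k(B, take_from_B)
--
--         # Merge to get maximum
--         merged = max_array_greedy(sub_A, sub_B)
--
--         if merged > max_result:
--             max_result = merged
--
--     return max_result
-- ===== SOURCE B (Python) =====
-- from typing import List
--
--
-- def _merge_max(arr1: List[int], arr2: List[int]) -> List[int]:
--     """Merge two arrays to get maximum lexicographical order."""
--     result = []
--     i, j = 0, 0
--     while i < len(arr1) and j < len(arr2):
--         if arr1[i:] > arr2[j:]:
--             result.append(arr1[i])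
--             i += 1
--         else:
--             result.append(arr2[j])
--             j += 1
--     result.extend(arr1[i:])
--     result.extend(arr2[j:])
--     return result
--
--
-- def _max_subseq(nums: List[int], k: int) -> List[int]:
--     """Maximum subsequence of length k by repeated window scans:
--     pick the leftmost maximum of the feasible window, then recurse past it."""
--     n = len(nums)
--     res = []
--     start = 0
--     for picked in range(k):
--         window = nums[start:n - (k - picked) + 1]
--         m = max(window)
--         idx = window.index(m)
--         res.append(m)
--         start = start + idx + 1
--     return res
--
--
-- def max_array_from_two_arrays_with_k(A: List[int], B: List[int], k: int) -> List[int]: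
--     candidates = [
--         _merge_max(_max_subseq(A, t), _max_subseq(B, k - t))
--         for t in range(max(0, k - len(B)), min(k, len(A)) + 1)
--     ]
--     return max(candidates, default=[])
-- ===== Notes on version B (the rewrite author's own statement) =====
-- stated objective: alternative
-- what changed: The length-k maximum subsequence is computed by repeated leftmost-maximum window scans (max + index on the feasible slice) instead of a monotonic stack with a removal budget, and the outer split loop becomes a comprehension whose best candidate is taken with max(..., default=[]).
import Mathlib
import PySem

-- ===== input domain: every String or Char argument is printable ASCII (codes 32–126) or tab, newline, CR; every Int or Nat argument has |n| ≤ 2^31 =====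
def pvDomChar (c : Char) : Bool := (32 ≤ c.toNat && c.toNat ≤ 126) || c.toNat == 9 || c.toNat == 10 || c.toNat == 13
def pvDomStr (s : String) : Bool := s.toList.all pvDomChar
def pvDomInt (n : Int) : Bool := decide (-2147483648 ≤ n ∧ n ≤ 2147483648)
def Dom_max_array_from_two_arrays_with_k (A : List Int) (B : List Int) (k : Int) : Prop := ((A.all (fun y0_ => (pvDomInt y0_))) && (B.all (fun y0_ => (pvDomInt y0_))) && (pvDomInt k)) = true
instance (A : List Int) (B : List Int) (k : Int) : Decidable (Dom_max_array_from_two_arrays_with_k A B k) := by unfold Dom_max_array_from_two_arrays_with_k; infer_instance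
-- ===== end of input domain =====

-- B replaces the monotonic-stack computation of the maximum length-k subsequence by repeated
-- leftmost-maximum window scans, and takes the best split candidate with max(..., default=[]);
-- objective: alternative (same results, genuinely different traversal; no speed claim).

-- ===== PORT A =====
-- Python list comparison 'xs > ys' on lists of ints (shared: both Pythons compare lists with '>').
def pvLexGt : List Int → List Int → Bool
  | [], _ => false
  | _ :: _, [] => true
  | a :: as, b :: bs => if a > b then true else if a < b then false else pvLexGt as bs

-- merge_max_arrays (the identical helper code appears in A and in Source B, so it is shared):
-- state (i, j) is carried as the two remaining suffixes arr1[i:], arr2[j:].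
def pvMergeMax : List Int → List Int → List Int
  | a :: as, b :: bs =>
      if pvLexGt (a :: as) (b :: bs) then a :: pvMergeMax as (b :: bs)
      else b :: pvMergeMax (a :: as) bs
  | xs, ys => xs ++ ys     -- result.extend(arr1[i:]); result.extend(arr2[j:])
termination_by xs ys => xs.length + ys.length

-- 'while stack and to_remove > 0 and stack[-1] < num: stack.pop(); to_remove -= 1'
-- (the Python list used as a stack is carried top-at-head; the return reverses it back)
def pvPopA (stack : List Int) (toRemove : Int) (num : Int) : List Int × Int :=
  match stack with
  | [] => ([], toRemove)
  | top :: rest =>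
      if toRemove > 0 && top < num then pvPopA rest (toRemove - 1) num
      else (top :: rest, toRemove)

-- the 'for num in nums' loop of max_subsequence_of_length_k
def pvRunA (stack : List Int) (toRemove : Int) (nums : List Int) : List Int × Int :=
  nums.foldl (fun st num =>
    let p := pvPopA st.1 st.2 num
    (num :: p.1, p.2)) (stack, toRemove)

-- the final 'while to_remove > 0: stack.pop(); to_remove -= 1' (stack top at head)
def pvFinalTrim (stack : List Int) (toRemove : Int) : List Int :=
  if _h : 0 < toRemove then
    match stack with
    | [] => []          -- Python's pop would raise here; unreachable in A's calls
    | _ :: rest => pvFinalTrim rest (toRemove - 1)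
  else stack
termination_by toRemove.toNat
decreasing_by omega

-- max_subsequence_of_length_k (monotonic stack)
def pvMaxSubA (nums : List Int) (k : Int) : List Int :=
  let n : Int := nums.length
  if k = 0 then []
  else if k = n then nums
  else
    let st := pvRunA [] (n - k) nums
    (pvFinalTrim st.1 st.2).reverse

def max_array_from_two_arrays_with_k (A : List Int) (B : List Int) (k : Int) : List Int :=
  (PySem.List.pyRange (max 0 (k - (B.length : Int))) (min k (A.length : Int) + 1) 1).foldl
    (fun maxResult t =>
      if pvLexGt (pvMergeMax (pvMaxSubA A t) (pvMaxSubA B (k - t))) maxResult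
      then pvMergeMax (pvMaxSubA A t) (pvMaxSubA B (k - t)) else maxResult) []

-- ===== PORT B =====
-- one round of _max_subseq: slice the feasible window, take max(window) and window.index(m)
def pvWinStep (nums : List Int) (k : Int) (st : List Int × Int) (picked : Int) : List Int × Int :=
  let window := PySem.List.slice nums (some st.2) (some ((nums.length : Int) - (k - picked) + 1))
  -- m = max(window); idx = window.index(m): max() raises on an empty window, which is
  -- unreachable for the calls the entry point makes (it always has 0 ≤ k ≤ len(nums))
  let m := (PySem.List.max? window (fun y => y)).getD 0
  let idx : Nat := (PySem.List.index? window m).getD 0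
  (st.1 ++ [m], st.2 + (idx : Int) + 1)

-- _max_subseq: 'for picked in range(k)' over the state (res, start)
def pvWinSub (nums : List Int) (k : Int) : List Int :=
  ((PySem.List.pyRange 0 k 1).foldl (pvWinStep nums k) ([], 0)).1

def max_array_from_two_arrays_with_k_alt (A : List Int) (B : List Int) (k : Int) : List Int :=
  let candidates := (PySem.List.pyRange (max 0 (k - (B.length : Int))) (min k (A.length : Int) + 1) 1).map
    (fun t => pvMergeMax (pvWinSub A t) (pvWinSub B (k - t)))
  -- max(candidates, default=[]): the first maximal candidate under Python's list '>'
  match candidates with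
  | [] => []
  | c :: cs => cs.foldl (fun best x => if pvLexGt x best then x else best) c

-- ===== PRECONDITION & SPEC =====
def Spec_max_array_from_two_arrays_with_k (A : List Int) (B : List Int) (k : Int) (out : List Int) : Prop := out = max_array_from_two_arrays_with_k_alt A B k
instance (A : List Int) (B : List Int) (k : Int) (out : List Int) : Decidable (Spec_max_array_from_two_arrays_with_k A B k out) := by unfold Spec_max_array_from_two_arrays_with_k; infer_instance

-- ===== CLAIM (what is proved, stated in full; the proofs are below) =====
def Claim_equal_max_array_from_two_arrays_with_k : Prop := ∀ (A : List Int) (B : List Int) (k : Int), Dom_max_array_from_two_arrays_with_k A B k → Spec_max_array_from_two_arrays_with_k A B k (max_array_from_two_arrays_with_k A B k)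

-- ===== LEMMAS AND PROOFS =====

-- Common functional specification of the maximum length-k subsequence: take the leftmost
-- maximum of the window that still leaves k-1 elements and recurse past it.
def pvGreedy : List Int → Nat → List Int
  | _, 0 => []
  | xs, (k+1) =>
      let win := xs.take (xs.length - k)
      let m := match win with | [] => 0 | x :: t => t.foldl max x
      m :: pvGreedy (xs.drop ((List.idxOf? m win).getD 0 + 1)) k

theorem pv_winloop (nums : List Int) (k : Int) :
    ∀ (kk : Nat) (start : Nat) (res : List Int), start + kk ≤ nums.length →
    ((PySem.List.pyRange (k - kk) k 1).foldl (pvWinStep nums k) (res, (start : Int))).1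
    = res ++ pvGreedy (nums.drop start) kk := by
  intro kk
  induction kk with
  | zero =>
    intro start res _
    rw [show k - (0:Nat) = k by push_cast; ring, PySem.List.pyRange_one_eq_nil le_rfl]
    simp [pvGreedy]
  | succ j ih =>
    intro start res hle
    rw [PySem.List.pyRange_one_cons (by push_cast; omega), List.foldl_cons,
        show k - ((j+1:Nat):Int) + 1 = k - (j:Nat) by push_cast; ring]
    have hb : ((nums.length : Int) - (k - (k - ((j+1:Nat):Int))) + 1) = ((nums.length - j : Nat) : Int) := by
      push_cast; omega
    rw [pvWinStep, hb, PySem.List.slice_natCast]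
    set xs := nums.drop start with hxs
    have hxslen : xs.length = nums.length - start := by simp [hxs]
    have hwin : List.take (nums.length - j - start) xs = xs.take (xs.length - j) := by
      rw [hxslen]; congr 1; omega
    rw [hwin]
    have hlen : (xs.take (xs.length - j)).length = xs.length - j := by
      simp
    obtain ⟨x, t, hxt⟩ : ∃ x t, xs.take (xs.length - j) = x :: t := by
      rcases h : xs.take (xs.length - j) with _ | ⟨x, t⟩
      · exfalso; rw [h] at hlen; simp at hlen; omega
      · exact ⟨_, _, rfl⟩
    rw [hxt, PySem.List.max?_id_cons]
    simp only [Option.getD_some]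
    set m := List.foldl max x t with hm
    have hmem : m ∈ x :: t := by
      rcases PySem.List.foldl_max_mem t x with h | h
      · rw [hm, h]; exact List.mem_cons_self
      · exact List.mem_cons_of_mem _ (by rw [hm]; exact h)
    obtain ⟨i, hi, hilt⟩ : ∃ i, List.idxOf? m (x :: t) = some i ∧ i < (x :: t).length := by
      have hs := List.isSome_idxOf?.mpr hmem
      rcases h : List.idxOf? m (x :: t) with _ | i
      · rw [h] at hs; simp at hs
      · exact ⟨i, rfl, (List.idxOf?_eq_some_iff.mp h).1⟩
    rw [PySem.List.index?_eq_idxOf?, hi]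
    simp only [Option.getD_some]
    have hilt' : i < xs.length - j := by rw [← hlen, hxt]; simpa using hilt
    rw [show ((start : Int) + (i : Nat) + 1) = ((start + i + 1 : Nat) : Int) by push_cast; ring,
        ih (start + i + 1) (res ++ [m]) (by omega)]
    conv_rhs => rw [pvGreedy]
    simp only [hxt]
    rw [← hm, hi]
    simp only [Option.getD_some, hxs, List.drop_drop]
    rw [show start + (i+1) = start + i + 1 by omega]
    simp

theorem pv_winsub_eq_greedy (nums : List Int) (k : Int) (h0 : 0 ≤ k)
    (hk : k ≤ (nums.length : Int)) : pvWinSub nums k = pvGreedy nums k.toNat := by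
  unfold pvWinSub
  rw [show PySem.List.pyRange 0 k 1 = PySem.List.pyRange (k - (k.toNat : Nat)) k 1 by congr 1; omega,
      show (([], 0) : List Int × Int) = (([], ((0 : Nat) : Int)) : List Int × Int) by norm_num,
      pv_winloop nums k k.toNat 0 [] (by omega)]
  simp

theorem pvPopA_sublist (s : List Int) (tr x : Int) : (pvPopA s tr x).1.Sublist s := by
  induction s generalizing tr with
  | nil => simp [pvPopA]
  | cons a s ih =>
    rw [pvPopA]
    split
    · exact (ih (tr - 1)).trans (List.sublist_cons_self a s)
    · simp

theorem pvPopA_len (s : List Int) (tr x : Int) :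
    (pvPopA s tr x).1.length ≤ s.length ∧
    (pvPopA s tr x).2 = tr - ((s.length : Int) - (pvPopA s tr x).1.length) := by
  induction s generalizing tr with
  | nil => simp [pvPopA]
  | cons a s ih =>
    rw [pvPopA]
    split
    · obtain ⟨h1, h2⟩ := ih (tr - 1)
      refine ⟨h1.trans (by simp), ?_⟩
      rw [h2]; simp; ring
    · simp

theorem pvPopA_nonneg (s : List Int) (tr x : Int) (h : 0 ≤ tr) : 0 ≤ (pvPopA s tr x).2 := by
  induction s generalizing tr with
  | nil => simpa [pvPopA]
  | cons a s ih =>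
    rw [pvPopA]
    split
    · rename_i hc
      simp only [Bool.and_eq_true, decide_eq_true_eq] at hc
      exact ih (tr - 1) (by omega)
    · simpa

theorem pvPopA_all (s : List Int) (tr x : Int) (hlt : ∀ a ∈ s, a < x)
    (hle : (s.length : Int) ≤ tr) : pvPopA s tr x = ([], tr - s.length) := by
  induction s generalizing tr with
  | nil => simp [pvPopA]
  | cons a s ih =>
    rw [pvPopA]
    have h1 : a < x := hlt a List.mem_cons_self
    have : tr > 0 := by simp at hle; omega
    rw [if_pos (by simp [h1, this])]
    rw [ih (tr - 1) (fun a ha => hlt a (List.mem_cons_of_mem _ ha)) (by simp at hle ⊢; omega)]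
    simp; ring

theorem pvRunA_append (s : List Int) (tr : Int) (xs ys : List Int) :
    pvRunA s tr (xs ++ ys) = pvRunA (pvRunA s tr xs).1 (pvRunA s tr xs).2 ys := by
  simp [pvRunA, List.foldl_append]

theorem pvRunA_inv (xs : List Int) (s : List Int) (tr : Int) (h : 0 ≤ tr) :
    0 ≤ (pvRunA s tr xs).2 ∧
    ((pvRunA s tr xs).1.length : Int) - (pvRunA s tr xs).2 = (s.length : Int) - tr + xs.length := by
  induction xs generalizing s tr with
  | nil => simp [pvRunA]; omega
  | cons x xs ih =>
    have hstep : pvRunA s tr (x :: xs) = pvRunA (x :: (pvPopA s tr x).1) (pvPopA s tr x).2 xs := by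
      simp [pvRunA]
    rw [hstep]
    obtain ⟨ha, hb⟩ := ih (x :: (pvPopA s tr x).1) (pvPopA s tr x).2 (pvPopA_nonneg s tr x h)
    refine ⟨ha, ?_⟩
    rw [hb]
    have := (pvPopA_len s tr x).2
    have := (pvPopA_len s tr x).1
    simp
    omega

theorem pvRunA_zero (xs : List Int) (s : List Int) : pvRunA s 0 xs = (xs.reverse ++ s, 0) := by
  induction xs generalizing s with
  | nil => simp [pvRunA]
  | cons x xs ih =>
    have hpop : pvPopA s 0 x = (s, 0) := by
      cases s <;> simp [pvPopA]
    have hstep : pvRunA s 0 (x :: xs) = pvRunA (x :: s) 0 xs := by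
      simp [pvRunA, hpop]
    rw [hstep, ih]
    simp

theorem pvL1 (M : Int) : ∀ (p : List Int) (s : List Int) (tr : Int),
    (∀ a ∈ p, a < M) → (∀ a ∈ s, a < M) → ((p.length : Int) + s.length ≤ tr) →
    pvRunA s tr (p ++ [M]) = ([M], tr - p.length - s.length) := by
  intro p
  induction p with
  | nil =>
    intro s tr _ hs hle
    have h1 : pvRunA s tr [M] = (M :: (pvPopA s tr M).1, (pvPopA s tr M).2) := by
      simp [pvRunA]
    rw [List.nil_append, h1, pvPopA_all s tr M hs (by simpa using hle)]
    simp
  | cons a p ih =>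
    intro s tr hp hs hle
    have hstep : pvRunA s tr ((a :: p) ++ [M]) = pvRunA (a :: (pvPopA s tr a).1) (pvPopA s tr a).2 (p ++ [M]) := by
      simp [pvRunA]
    have hsub := pvPopA_sublist s tr a
    have hlen := pvPopA_len s tr a
    rw [hstep, ih (a :: (pvPopA s tr a).1) (pvPopA s tr a).2
      (fun b hb => hp b (List.mem_cons_of_mem a hb))
      (fun b hb => by
        rcases List.mem_cons.mp hb with h | h
        · exact h ▸ hp a List.mem_cons_self
        · exact hs b (hsub.mem h))
      (by obtain ⟨h1, h2⟩ := hlen; simp at hle ⊢; omega)]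
    obtain ⟨h1, h2⟩ := hlen
    have : (pvPopA s tr a).2 - ((a :: (pvPopA s tr a).1).length : Int) = tr - (s.length : Int) - 1 := by
      simp; omega
    rw [Prod.ext_iff]
    refine ⟨rfl, ?_⟩
    simp at this ⊢
    omega

theorem pvPopA_bottom (M : Int) : ∀ (above : List Int) (b x : Int),
    (b - (above.length : Int) ≤ 0 ∨ x ≤ M) →
    pvPopA (above ++ [M]) b x = ((pvPopA above b x).1 ++ [M], (pvPopA above b x).2) := by
  intro above
  induction above with
  | nil =>
    intro b x h
    simp only [List.length_nil] at h
    have hneg : ¬ ((decide (b > 0) && decide (M < x)) = true) := by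
      simp only [Bool.and_eq_true, decide_eq_true_eq, not_and]
      intro hb
      rcases h with h | h <;> omega
    simp only [List.nil_append, pvPopA, if_neg hneg]
  | cons a above ih =>
    intro b x h
    simp only [List.cons_append, pvPopA]
    split
    · apply ih (b - 1) x
      rcases h with h | h
      · left; simp at h ⊢; omega
      · exact Or.inr h
    · simp

theorem pvL2 (M : Int) (ys : List Int) (above : List Int) (b : Int)
    (hcond : ∀ (j : Nat) (hj : j < ys.length), (j : Int) < b - above.length → ys[j] ≤ M) :
    pvRunA (above ++ [M]) b ys = ((pvRunA above b ys).1 ++ [M], (pvRunA above b ys).2) := by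
  induction ys generalizing above b with
  | nil => simp [pvRunA]
  | cons x ys ih =>
    have hx : b - (above.length : Int) ≤ 0 ∨ x ≤ M := by
      by_cases hb : b - (above.length : Int) ≤ 0
      · exact Or.inl hb
      · exact Or.inr (by simpa using hcond 0 (Nat.succ_pos _) (by omega))
    have hstep1 : pvRunA (above ++ [M]) b (x :: ys) =
        pvRunA ((x :: (pvPopA above b x).1) ++ [M]) (pvPopA above b x).2 ys := by
      simp [pvRunA, pvPopA_bottom M above b x hx]
    have hstep2 : pvRunA above b (x :: ys) =
        pvRunA (x :: (pvPopA above b x).1) (pvPopA above b x).2 ys := by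
      simp [pvRunA]
    rw [hstep1, hstep2]
    apply ih
    intro j hj hlt
    have hlen := pvPopA_len above b x
    obtain ⟨hl1, hl2⟩ := pvPopA_len above b x
    simp only [List.length_cons] at hlt
    have := hcond (j+1) (by simpa using hj) (by push_cast at hlt ⊢; omega)
    simpa using this

theorem pvTrim_drop (s : List Int) (t : Int) (h0 : 0 ≤ t) (hle : t ≤ (s.length : Int)) :
    pvFinalTrim s t = s.drop t.toNat := by
  induction s generalizing t with
  | nil => rw [pvFinalTrim]; simp
  | cons a s ih =>
    rw [pvFinalTrim]
    by_cases ht : 0 < t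
    · rw [dif_pos ht]
      rw [ih (t-1) (by omega) (by simp at hle ⊢; omega)]
      have : t.toNat = (t-1).toNat + 1 := by omega
      rw [this]
      simp
    · rw [dif_neg ht]
      have : t.toNat = 0 := by omega
      simp [this]


def pvMainStack (nums : List Int) (kk : Nat) : List Int :=
  (pvFinalTrim (pvRunA [] ((nums.length : Int) - kk) nums).1
    (pvRunA [] ((nums.length : Int) - kk) nums).2).reverse

theorem pv_stack_eq_greedy : ∀ (kk : Nat) (nums : List Int), kk ≤ nums.length →
    pvMainStack nums kk = pvGreedy nums kk := by
  intro kk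
  induction kk with
  | zero =>
    intro nums _
    unfold pvMainStack
    simp only [Nat.cast_zero, sub_zero]
    obtain ⟨h1, h2⟩ := pvRunA_inv nums [] ((nums.length : Int)) (by simp)
    simp only [List.length_nil, Nat.cast_zero] at h2
    rw [pvTrim_drop _ _ h1 (by omega)]
    have : ((pvRunA [] ((nums.length : Int)) nums).2).toNat = (pvRunA [] ((nums.length : Int)) nums).1.length := by
      omega
    simp [this, pvGreedy]
  | succ kk ih =>
    intro nums hle
    set n := nums.length with hn
    -- the window, its max, its first index
    set win := nums.take (n - kk) with hwin
    have hwinlen : win.length = n - kk := by rw [hwin]; simp; omega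
    obtain ⟨x, t, hxt⟩ : ∃ x t, win = x :: t := by
      rcases h : win with _ | ⟨x, t⟩
      · exfalso; rw [h] at hwinlen; simp at hwinlen; omega
      · exact ⟨_, _, rfl⟩
    set m : Int := t.foldl max x with hm
    have hub : ∀ y ∈ win, y ≤ m := by
      intro y hy
      rw [hxt] at hy
      rcases List.mem_cons.mp hy with h | h
      · rw [h, hm]; exact (PySem.List.le_foldl_max t x).1
      · exact (PySem.List.le_foldl_max t x).2 y h
    have hmem : m ∈ win := by
      rw [hxt]
      rcases PySem.List.foldl_max_mem t x with h | h
      · rw [hm, h]; exact List.mem_cons_self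
      · exact List.mem_cons_of_mem _ (by rw [hm]; exact h)
    obtain ⟨i, hi⟩ : ∃ i, List.idxOf? m win = some i := by
      have hs := List.isSome_idxOf?.mpr hmem
      rcases h : List.idxOf? m win with _ | i
      · rw [h] at hs; simp at hs
      · exact ⟨i, rfl⟩
    obtain ⟨hilt, hieq, hbefore⟩ := List.idxOf?_eq_some_iff.mp hi
    rw [hwinlen] at hilt
    have hiwin : i < n - kk := hilt
    have hin : i < n := by omega
    have hgwin : win[i]'(by omega) = nums[i]'(by rw [← hn]; omega) := by
      simp [hwin]
    -- decomposition of nums around the leftmost maximum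
    have hdecomp : nums = (nums.take i ++ [m]) ++ nums.drop (i+1) := by
      conv_lhs => rw [← List.take_append_drop i nums]
      rw [List.append_assoc, List.singleton_append]
      congr 1
      rw [List.drop_eq_getElem_cons (by rw [← hn]; omega)]
      congr 1
      rw [← hgwin, hieq]
    have hpref : ∀ a ∈ nums.take i, a < m := by
      intro a ha
      rw [List.mem_take_iff_getElem] at ha
      obtain ⟨j, hj, hja⟩ := ha
      have hjn : j < i := by omega
      have hjw : j < win.length := by omega
      have haw : win[j]'hjw = a := by
        simp [hwin, ← hja]
      have hne : a ≠ m := by rw [← haw]; exact fun hh => hbefore j hjn hh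
      have hle' : a ≤ m := by rw [← haw]; exact hub _ (List.getElem_mem hjw)
      omega
    -- set up the run
    set r : Nat := n - (kk+1) with hr
    have hbudget : ((n : Int) - ((kk+1 : Nat) : Int)) = ((r : Nat) : Int) := by push_cast; omega
    have hir : i ≤ r := by omega
    set ys := nums.drop (i+1) with hys
    have hyslen : ys.length = n - (i+1) := by rw [hys]; simp [← hn]
    unfold pvMainStack
    rw [← hn, hbudget]
    conv_lhs => rw [hdecomp]
    rw [pvRunA_append]
    rw [pvL1 m (nums.take i) [] r hpref (by simp) (by simp [← hn]; omega)]
    have htklen : (nums.take i).length = i := by simp [← hn]; omega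
    rw [htklen]
    simp only [List.length_nil, Nat.cast_zero, sub_zero]
    have hb0 : (0:Int) ≤ (r:Int) - i := by omega
    have hcond : ∀ (j : Nat) (hj : j < ys.length), (j : Int) < (r:Int) - i - ([] : List Int).length → ys[j] ≤ m := by
      intro j hj hlt
      simp only [List.length_nil, Nat.cast_zero, sub_zero] at hlt
      have hji : i + 1 + j < n - kk := by omega
      have : ys[j] = nums[i+1+j]'(by omega) := by
        simp [hys]
      rw [this]
      have hw : win[i+1+j]'(by omega) = nums[i+1+j]'(by omega) := by
        simp [hwin]
      rw [← hw]
      exact hub _ (List.getElem_mem _)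
    have hL2 := pvL2 m ys [] ((r:Int) - i) hcond
    simp only [List.nil_append] at hL2
    rw [hL2]
    set S := (pvRunA [] ((r:Int) - i) ys).1 with hS
    set bf := (pvRunA [] ((r:Int) - i) ys).2 with hbf
    obtain ⟨hbf0, hSlen⟩ := pvRunA_inv ys [] ((r:Int) - i) hb0
    rw [← hbf] at hbf0
    rw [← hS, ← hbf] at hSlen
    simp only [List.length_nil, Nat.cast_zero] at hSlen
    have hSk : (S.length : Int) - bf = kk := by rw [hSlen]; omega
    have hbfle : bf ≤ (S.length : Int) := by omega
    rw [pvTrim_drop (S ++ [m]) bf hbf0 (by simp; omega)]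
    rw [List.drop_append_of_le_length (by omega)]
    rw [List.reverse_append, List.reverse_singleton, List.singleton_append]
    -- greedy side
    conv_rhs => rw [pvGreedy]
    simp only [← hn]
    have hi' := hi
    rw [hxt] at hi'
    rw [show nums.take (n - kk) = win from hwin.symm]
    simp only [hxt]
    rw [← hm, hi', Option.getD_some]
    congr 1
    rw [← hys, ← ih ys (by omega)]
    unfold pvMainStack
    rw [show ((ys.length : Int) - (kk : Nat)) = (r:Int) - i from by omega]
    rw [← hS, ← hbf, pvTrim_drop S bf hbf0 hbfle]

theorem pv_maxsub_eq_greedy (nums : List Int) (k : Int) (h0 : 0 ≤ k)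
    (hk : k ≤ (nums.length : Int)) : pvMaxSubA nums k = pvGreedy nums k.toNat := by
  unfold pvMaxSubA
  by_cases hz : k = 0
  · simp [hz, pvGreedy]
  · by_cases hn : k = (nums.length : Int)
    · simp only [if_neg hz, if_pos hn]
      have hms : pvMainStack nums nums.length = nums := by
        unfold pvMainStack
        rw [show ((nums.length : Int) - (nums.length : Nat)) = 0 by omega, pvRunA_zero]
        rw [pvTrim_drop _ 0 le_rfl (by omega)]
        simp
      rw [show k.toNat = nums.length by omega, ← pv_stack_eq_greedy nums.length nums le_rfl, hms]
    · simp only [if_neg hz, if_neg hn]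
      have h := pv_stack_eq_greedy k.toNat nums (by omega)
      unfold pvMainStack at h
      rw [show ((nums.length : Int) - k) = ((nums.length : Int) - ((k.toNat : Nat) : Int)) by omega]
      exact h

theorem pv_maxsub_eq_winsub (nums : List Int) (k : Int) (h0 : 0 ≤ k)
    (hk : k ≤ (nums.length : Int)) : pvMaxSubA nums k = pvWinSub nums k := by
  rw [pv_maxsub_eq_greedy nums k h0 hk, pv_winsub_eq_greedy nums k h0 hk]

-- running 'best = c if c > best else best' from [] is the same as starting from the first
-- candidate (a candidate always beats or equals the initial [])
theorem pv_fold_max (l : List (List Int)) :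
    l.foldl (fun best x => if pvLexGt x best then x else best) [] =
    (match l with
     | [] => []
     | c :: cs => cs.foldl (fun best x => if pvLexGt x best then x else best) c) := by
  cases l with
  | nil => rfl
  | cons c cs =>
    simp only [List.foldl_cons]
    congr 1
    cases c with
    | nil => simp [pvLexGt]
    | cons a as => simp [pvLexGt]

-- ===== VERDICT (by name: the statement is the Claim_ definition above) =====
theorem max_array_from_two_arrays_with_k_spec : Claim_equal_max_array_from_two_arrays_with_k := by
  intro A B k _
  unfold Spec_max_array_from_two_arrays_with_k
  unfold max_array_from_two_arrays_with_k max_array_from_two_arrays_with_k_alt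
  simp only []
  have hfg : ∀ (acc : List Int) (t : Int),
      t ∈ PySem.List.pyRange (max 0 (k - (B.length : Int))) (min k (A.length : Int) + 1) 1 →
      (if pvLexGt (pvMergeMax (pvMaxSubA A t) (pvMaxSubA B (k - t))) acc
       then pvMergeMax (pvMaxSubA A t) (pvMaxSubA B (k - t)) else acc) =
      (if pvLexGt (pvMergeMax (pvWinSub A t) (pvWinSub B (k - t))) acc
       then pvMergeMax (pvWinSub A t) (pvWinSub B (k - t)) else acc) := by
    intro acc t ht
    rw [PySem.List.mem_pyRange_one] at ht
    obtain ⟨h1, h2⟩ := ht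
    have hA : pvMaxSubA A t = pvWinSub A t := by
      apply pv_maxsub_eq_winsub
      · have := le_max_left (0 : Int) (k - (B.length : Int)); omega
      · have := min_le_right k ((A.length : Int)); omega
    have hB : pvMaxSubA B (k - t) = pvWinSub B (k - t) := by
      apply pv_maxsub_eq_winsub
      · have := min_le_left k ((A.length : Int)); omega
      · have := le_max_right (0 : Int) (k - (B.length : Int)); omega
    rw [hA, hB]
  rw [PySem.List.foldl_congr_mem
      (PySem.List.pyRange (max 0 (k - (B.length : Int))) (min k (A.length : Int) + 1) 1)
      (f := fun maxResult t =>
        if pvLexGt (pvMergeMax (pvMaxSubA A t) (pvMaxSubA B (k - t))) maxResult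
        then pvMergeMax (pvMaxSubA A t) (pvMaxSubA B (k - t)) else maxResult)
      (g := fun maxResult t =>
        if pvLexGt (pvMergeMax (pvWinSub A t) (pvWinSub B (k - t))) maxResult
        then pvMergeMax (pvWinSub A t) (pvWinSub B (k - t)) else maxResult)
      [] hfg]
  rw [← List.foldl_map (f := fun t => pvMergeMax (pvWinSub A t) (pvWinSub B (k - t)))
        (g := fun best x => if pvLexGt x best then x else best)]
  exact pv_fold_max _
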